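-- pv_equiv track=rewrite | github.com/Swipetune/Gardening | crosslister/rules.py | limit_colors
-- ===== SOURCE A (Python) =====
-- def limit_colors(colors: list[str]) -> list[str]:
--     unique = []
--     for color in colors:
--         normalized = color.strip()
--         if normalized and normalized not in unique:
--             unique.append(normalized)
--         if len(unique) == 3:
--             break
--     return unique
-- ===== SOURCE B (Python) =====
-- def limit_colors(colors: list[str]) -> list[str]:
--     first_idx = {}
--     for i, c in enumerate(colors):
--         s = c.strip()
--         if s:
--             first_idx.setdefault(s, i)
--     return sorted(first_idx, key=first_idx.get)[:3]
-- ===== Notes on version B (the rewrite author's own statement) =====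
-- stated objective: alternative
-- what changed: Replaces A's scan with a membership check and a length-capped early break by a table-then-sort shape: one full pass records each non-empty stripped color's first index in a dict via setdefault, then the keys are sorted by that first index and the first three are sliced off.
import Mathlib
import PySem

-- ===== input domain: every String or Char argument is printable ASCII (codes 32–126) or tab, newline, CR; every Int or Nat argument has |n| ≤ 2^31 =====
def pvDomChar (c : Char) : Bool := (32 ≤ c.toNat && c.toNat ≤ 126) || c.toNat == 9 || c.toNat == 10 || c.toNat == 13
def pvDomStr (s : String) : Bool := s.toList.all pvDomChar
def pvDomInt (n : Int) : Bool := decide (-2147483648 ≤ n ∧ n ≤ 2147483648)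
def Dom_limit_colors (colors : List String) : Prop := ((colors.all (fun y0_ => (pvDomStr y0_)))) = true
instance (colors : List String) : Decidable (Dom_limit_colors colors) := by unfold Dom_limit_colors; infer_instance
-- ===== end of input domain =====

-- B replaces A's scan-with-membership-check-and-early-break by a different shape: one full pass
-- building a first-index table (setdefault), then sorting the keys by first index and slicing [:3].

-- ===== PORT A =====
def limitGo : List String → List String → List String
  | [], unique => unique
  | c :: rest, unique =>
    let normalized := PySem.Str.strip c
    let unique' := if normalized ≠ "" ∧ normalized ∉ unique then unique ++ [normalized] else unique
    if unique'.length = 3 then unique' else limitGo rest unique'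

def limit_colors (colors : List String) : List String := limitGo colors []

-- ===== PORT B =====
def pvStep (d : PySem.Dict String Int) (p : Int × String) : PySem.Dict String Int :=
  let s := PySem.Str.strip p.2
  if s ≠ "" then PySem.Dict.setdefault d s p.1 else d

def limit_colors_alt (colors : List String) : List String :=
  let first_idx := (PySem.List.enumerate colors 0).foldl pvStep PySem.Dict.empty
  -- sorted(first_idx, key=first_idx.get): iterate keys, sort by stored first index (all keys present)
  (PySem.List.sorted (PySem.Dict.keys first_idx) (fun k => PySem.Dict.getD first_idx k 0) false).take 3

-- ===== PRECONDITION & SPEC =====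
def Spec_limit_colors (colors : List String) (out : List String) : Prop := out = limit_colors_alt colors
instance (colors : List String) (out : List String) : Decidable (Spec_limit_colors colors out) := by unfold Spec_limit_colors; infer_instance

-- ===== CLAIM (what is proved, stated in full; the proofs are below) =====
def Claim_equal_limit_colors : Prop := ∀ (colors : List String), Dom_limit_colors colors → Spec_limit_colors colors (limit_colors colors)

-- ===== LEMMAS AND PROOFS =====

-- A equals (dedup of the stripped non-empty colors) take 3 -------------------

theorem prefix_foldl_add (l : List String) (s : List String) :
    s <+: l.foldl PySem.Set.add s := by
  induction l generalizing s with
  | nil => exact List.prefix_rfl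
  | cons x l ih =>
      refine List.IsPrefix.trans ?_ (ih (PySem.Set.add s x))
      simp only [PySem.Set.add]
      split
      · exact List.prefix_rfl
      · exact List.prefix_append _ _

theorem limitGo_eq (colors : List String) (acc : List String) (h : acc.length < 3) :
    limitGo colors acc =
      (((colors.map PySem.Str.strip).filter (fun s => s ≠ "")).foldl PySem.Set.add acc).take 3 := by
  induction colors generalizing acc with
  | nil =>
      simp [limitGo, List.take_of_length_le (Nat.le_of_lt h)]
  | cons c rest ih =>
      simp only [limitGo]
      by_cases hne : PySem.Str.strip c ≠ ""
      · have hf : List.filter (fun s => decide (s ≠ "")) (List.map PySem.Str.strip (c :: rest)) =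
            PySem.Str.strip c :: List.filter (fun s => decide (s ≠ "")) (List.map PySem.Str.strip rest) := by
          simp [hne]
        rw [hf, List.foldl_cons]
        by_cases hmem : PySem.Str.strip c ∈ acc
        · have hadd : PySem.Set.add acc (PySem.Str.strip c) = acc := by
            simp [PySem.Set.add, PySem.Set.contains, hmem]
          have hcond : (if PySem.Str.strip c ≠ "" ∧ PySem.Str.strip c ∉ acc then
              acc ++ [PySem.Str.strip c] else acc) = acc := by
            simp [hmem]
          rw [hcond, hadd, if_neg (by omega)]
          exact ih acc h
        · have hadd : PySem.Set.add acc (PySem.Str.strip c) = acc ++ [PySem.Str.strip c] := by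
            simp [PySem.Set.add, PySem.Set.contains, hmem]
          have hcond : (if PySem.Str.strip c ≠ "" ∧ PySem.Str.strip c ∉ acc then
              acc ++ [PySem.Str.strip c] else acc) = acc ++ [PySem.Str.strip c] := by
            simp [hne, hmem]
          rw [hcond, hadd]
          by_cases h3 : (acc ++ [PySem.Str.strip c]).length = 3
          · rw [if_pos h3]
            have hpre := prefix_foldl_add ((rest.map PySem.Str.strip).filter (fun s => s ≠ ""))
              (acc ++ [PySem.Str.strip c])
            have := List.prefix_iff_eq_take.mp hpre
            rw [h3] at this
            exact this
          · rw [if_neg h3]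
            exact ih _ (by simp at h3 ⊢; omega)
      · rw [not_not] at hne
        have hf : List.filter (fun s => decide (s ≠ "")) (List.map PySem.Str.strip (c :: rest)) =
            List.filter (fun s => decide (s ≠ "")) (List.map PySem.Str.strip rest) := by
          simp [hne]
        have hcond : (if PySem.Str.strip c ≠ "" ∧ PySem.Str.strip c ∉ acc then
            acc ++ [PySem.Str.strip c] else acc) = acc := by simp [hne]
        rw [hf, hcond, if_neg (by omega)]
        exact ih acc h

-- B's fold: the first-index dict has keys = dedup of the stripped non-empty colors,
-- with strictly increasing stored indices along the key list ------------------

theorem fold_invariant (cs : List String) (i : Int) (d : PySem.Dict String Int)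
    (hb : ∀ p ∈ d.items, p.2 < i)
    (hp : d.items.Pairwise (fun a b => a.2 < b.2)) :
    PySem.Dict.keys ((PySem.List.enumerate cs i).foldl pvStep d) =
      PySem.Set.update (PySem.Dict.keys d) ((cs.map PySem.Str.strip).filter (fun s => s ≠ "")) ∧
    (∀ p ∈ ((PySem.List.enumerate cs i).foldl pvStep d).items, p.2 < i + cs.length) ∧
    ((PySem.List.enumerate cs i).foldl pvStep d).items.Pairwise (fun a b => a.2 < b.2) := by
  induction cs generalizing i d with
  | nil =>
      refine ⟨by simp [PySem.List.enumerate_nil, PySem.Set.update_nil], ?_,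
        by simpa [PySem.List.enumerate_nil] using hp⟩
      intro p hpm
      simp only [PySem.List.enumerate_nil, List.foldl_nil, List.length_nil] at hpm ⊢
      have := hb p hpm
      omega
  | cons c rest ih =>
      rw [PySem.List.enumerate_cons, List.foldl_cons]
      by_cases hne : PySem.Str.strip c ≠ ""
      · have hf : List.filter (fun s => decide (s ≠ "")) (List.map PySem.Str.strip (c :: rest)) =
            PySem.Str.strip c :: List.filter (fun s => decide (s ≠ "")) (List.map PySem.Str.strip rest) := by
          simp [hne]
        have hstep : pvStep d (i, c) = PySem.Dict.setdefault d (PySem.Str.strip c) i := by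
          simp [pvStep, hne]
        rw [hstep]
        by_cases hmem : PySem.Dict.contains d (PySem.Str.strip c) = true
        · -- already present: dict unchanged
          have hsd : PySem.Dict.setdefault d (PySem.Str.strip c) i = d := by
            simp [PySem.Dict.setdefault, hmem]
          rw [hsd]
          have hkmem : PySem.Str.strip c ∈ PySem.Dict.keys d :=
            (PySem.Dict.contains_iff_mem_keys d _).mp hmem
          obtain ⟨hk, hb', hp'⟩ := ih (i + 1) d
            (fun p hpm => lt_trans (hb p hpm) (by omega)) hp
          refine ⟨?_, ?_, hp'⟩
          · rw [hk, hf, PySem.Set.update_cons, PySem.Set.add_of_mem hkmem]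
          · intro p hpm
            have := hb' p hpm
            simp only [List.length_cons] at this ⊢
            push_cast at this ⊢
            omega
        · -- new key: appended with value i
          have hsd : (PySem.Dict.setdefault d (PySem.Str.strip c) i).items =
              d.items ++ [(PySem.Str.strip c, i)] := by
            simp [PySem.Dict.setdefault, hmem]
          have hb2 : ∀ p ∈ (PySem.Dict.setdefault d (PySem.Str.strip c) i).items, p.2 < i + 1 := by
            intro p hpm
            rw [hsd] at hpm
            rcases List.mem_append.mp hpm with h1 | h1
            · exact lt_trans (hb p h1) (by omega)
            · simp at h1; rw [h1]; omega
          have hp2 : (PySem.Dict.setdefault d (PySem.Str.strip c) i).items.Pairwise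
              (fun a b => a.2 < b.2) := by
            rw [hsd]
            refine List.pairwise_append.mpr ⟨hp, List.pairwise_singleton _ _, ?_⟩
            intro a ha b hbm
            simp at hbm; rw [hbm]
            exact hb a ha
          have hkeys' : PySem.Dict.keys (PySem.Dict.setdefault d (PySem.Str.strip c) i) =
              PySem.Dict.keys d ++ [PySem.Str.strip c] := by
            simp [PySem.Dict.keys, hsd]
          have hkmem : PySem.Str.strip c ∉ PySem.Dict.keys d :=
            fun hm => hmem ((PySem.Dict.contains_iff_mem_keys d _).mpr hm)
          obtain ⟨hk, hb', hp'⟩ := ih (i + 1) _ hb2 hp2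
          refine ⟨?_, ?_, hp'⟩
          · rw [hk, hkeys', hf, PySem.Set.update_cons, PySem.Set.add_of_not_mem hkmem]
          · intro p hpm
            have := hb' p hpm
            simp only [List.length_cons] at this ⊢
            push_cast at this ⊢
            omega
      · rw [not_not] at hne
        have hf : List.filter (fun s => decide (s ≠ "")) (List.map PySem.Str.strip (c :: rest)) =
            List.filter (fun s => decide (s ≠ "")) (List.map PySem.Str.strip rest) := by
          simp [hne]
        have hstep : pvStep d (i, c) = d := by simp [pvStep, hne]
        rw [hstep]
        obtain ⟨hk, hb', hp'⟩ := ih (i + 1) d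
          (fun p hpm => lt_trans (hb p hpm) (by omega)) hp
        refine ⟨by rw [hk, hf], ?_, hp'⟩
        intro p hpm
        have := hb' p hpm
        simp only [List.length_cons] at this ⊢
        push_cast at this ⊢
        omega

-- on a dict with nodup keys, getD reads each item's own value
theorem getD_of_items_pairwise (d : PySem.Dict String Int)
    (hn : (PySem.Dict.keys d).Nodup) :
    ∀ p ∈ d.items, PySem.Dict.getD d p.1 0 = p.2 := by
  intro p hpm
  have := PySem.Dict.get?_of_mem_items (d := d) (k := p.1) (v := p.2) hpm hn
  simp [PySem.Dict.getD, this]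

theorem keys_pairwise_getD (d : PySem.Dict String Int)
    (hn : (PySem.Dict.keys d).Nodup)
    (hp : d.items.Pairwise (fun a b => a.2 < b.2)) :
    (PySem.Dict.keys d).Pairwise
      (fun a b => PySem.Dict.getD d a 0 < PySem.Dict.getD d b 0) := by
  have hp2 : d.items.Pairwise
      (fun a b => PySem.Dict.getD d a.1 0 < PySem.Dict.getD d b.1 0) := by
    refine List.Pairwise.imp_of_mem ?_ hp
    intro a b ha hbm hab
    rw [getD_of_items_pairwise d hn a ha, getD_of_items_pairwise d hn b hbm]
    exact hab
  exact List.pairwise_map.mpr hp2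

-- ===== VERDICT (by name: the statement is the Claim_ definition above) =====
theorem limit_colors_spec : Claim_equal_limit_colors := by
  intro colors _
  show limit_colors colors = limit_colors_alt colors
  obtain ⟨hk, _, hp⟩ := fold_invariant colors 0 PySem.Dict.empty
    (by simp [PySem.Dict.empty]) (by simp [PySem.Dict.empty])
  set d := (PySem.List.enumerate colors 0).foldl pvStep PySem.Dict.empty with hd
  have hkeys : PySem.Dict.keys d =
      PySem.List.dedup ((colors.map PySem.Str.strip).filter (fun s => s ≠ "")) := by
    rw [hk]
    simp [PySem.Dict.keys, PySem.Dict.empty, PySem.Set.update_nil_left,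
      PySem.List.dedup_eq_ofList]
  have hnodup : (PySem.Dict.keys d).Nodup := by
    rw [hkeys, PySem.List.dedup_eq_ofList]; exact PySem.Set.nodup_ofList _
  have hsorted : PySem.List.sorted (PySem.Dict.keys d)
      (fun k => PySem.Dict.getD d k 0) false = PySem.Dict.keys d :=
    PySem.List.sorted_eq_of_perm_of_pairwise_lt (PySem.Dict.keys d) (PySem.Dict.keys d)
      (fun k => PySem.Dict.getD d k 0) (List.Perm.refl _) (keys_pairwise_getD d hnodup hp)
  have hB : limit_colors_alt colors = (PySem.Dict.keys d).take 3 := by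
    simp only [limit_colors_alt]
    rw [← hd, hsorted]
  rw [hB, hkeys, limit_colors, limitGo_eq colors [] (by simp),
    PySem.List.dedup_eq_ofList, PySem.Set.ofList_eq_foldl]
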